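-- pv_equiv track=rewrite | github.com/brycekepple7756/CS_415_overview | 25 BookWorm/starter_bookworms.py | find_bookworms
-- ===== SOURCE A (Python) =====
-- def find_bookworms(sorted_patrons):
--     #goes through each patron in the dictionary and sets the bookworm count to 0 and the peak count to 0
--     patrons_data=[]
--     for key in sorted_patrons:
--         bookworm_count=0
--         peak_count=0
--
--         #goes through each item for that patron and adds one to the bookworm count if the item is a start and minus one if it is an end
--         # each time it goes through an item the peak count is updated if the bookworm count is larger
--         for item in sorted_patrons[key]:
--             if item[0]=="start":
--                 bookworm_count+=1
--             elif item[0]=="end":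
--                 bookworm_count-=1
--             if bookworm_count>peak_count:
--                 peak_count=bookworm_count
--         #after going through all the items a tuple is made of
--         patrons_data.append((key,peak_count))
--     return patrons_data
-- ===== SOURCE B (Python) =====
-- from functools import reduce
--
-- def find_bookworms(sorted_patrons):
--     # Right-fold (suffix) recurrence instead of A's forward running-count scan:
--     # peak of an event list satisfies peak([]) = 0 and
--     # peak(item::rest) = max(0, delta(item) + peak(rest)),
--     # because the maximal prefix sum (with baseline 0) of d::rest is max(0, d + that of rest).
--     # Realised as a reduce over the REVERSED event list, so no running count or
--     # running peak is ever maintained.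
--     def peak(events):
--         return reduce(
--             lambda acc, item:
--                 max(0, (1 if item[0] == "start" else -1 if item[0] == "end" else 0) + acc),
--             reversed(events),
--             0,
--         )
--     return [(key, peak(items)) for key, items in sorted_patrons.items()]
-- ===== Notes on version B (the rewrite author's own statement) =====
-- stated objective: alternative
-- what changed: Replaced A's forward single pass maintaining a running count and running peak with a backward right-fold over each patron's events using the suffix recurrence peak(item::rest) = max(0, delta(item) + peak(rest)), realised as reduce over the reversed list; no running count or peak state exists in B.
import Mathlib
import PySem

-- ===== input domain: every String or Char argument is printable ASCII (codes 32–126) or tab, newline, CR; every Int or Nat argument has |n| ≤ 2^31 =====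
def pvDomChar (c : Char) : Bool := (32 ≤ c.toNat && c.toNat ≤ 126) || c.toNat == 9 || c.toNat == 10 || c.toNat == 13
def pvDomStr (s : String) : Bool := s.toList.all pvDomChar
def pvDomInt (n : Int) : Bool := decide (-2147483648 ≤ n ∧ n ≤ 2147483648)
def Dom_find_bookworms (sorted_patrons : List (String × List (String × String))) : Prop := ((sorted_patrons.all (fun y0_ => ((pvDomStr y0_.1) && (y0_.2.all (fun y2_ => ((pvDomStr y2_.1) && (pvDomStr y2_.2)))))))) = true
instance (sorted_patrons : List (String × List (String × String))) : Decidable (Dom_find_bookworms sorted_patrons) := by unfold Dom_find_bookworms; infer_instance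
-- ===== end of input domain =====

-- B replaces A's forward running-count-and-peak loop by a backward right-fold over each
-- patron's events (peak(item::rest) = max(0, delta + peak(rest)), a reduce over the reversed list).

-- ===== PORT A =====
-- inner loop of A: state (bookworm_count, peak_count), branches in A's order
def pvStepA (s : Int × Int) (item : String × String) : Int × Int :=
  let bookworm_count :=
    if item.1 == "start" then s.1 + 1
    else if item.1 == "end" then s.1 - 1
    else s.1
  (bookworm_count, if bookworm_count > s.2 then bookworm_count else s.2)

def find_bookworms (sorted_patrons : List (String × List (String × String))) : List (String × Int) :=
  sorted_patrons.foldl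
    (fun patrons_data kv =>
      let st := kv.2.foldl pvStepA (0, 0)
      patrons_data ++ [(kv.1, st.2)])
    []

-- ===== PORT B =====
-- Source B's peak: reduce of (acc, item) ↦ max(0, delta(item) + acc) over the REVERSED event list, init 0
def pvPeakB (events : List (String × String)) : Int :=
  events.reverse.foldl
    (fun acc item =>
      max 0 ((if item.1 == "start" then (1 : Int) else if item.1 == "end" then -1 else 0) + acc))
    0

def find_bookworms_alt (sorted_patrons : List (String × List (String × String))) : List (String × Int) :=
  sorted_patrons.map (fun kv => (kv.1, pvPeakB kv.2))

-- ===== PRECONDITION & SPEC =====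
def Spec_find_bookworms (sorted_patrons : List (String × List (String × String))) (out : List (String × Int)) : Prop := out = find_bookworms_alt sorted_patrons
instance (sorted_patrons : List (String × List (String × String))) (out : List (String × Int)) : Decidable (Spec_find_bookworms sorted_patrons out) := by unfold Spec_find_bookworms; infer_instance

-- ===== CLAIM =====
def Claim_equal_find_bookworms : Prop := ∀ (sorted_patrons : List (String × List (String × String))), Dom_find_bookworms sorted_patrons → Spec_find_bookworms sorted_patrons (find_bookworms sorted_patrons)

-- ===== LEMMAS AND PROOFS =====

-- the reversed foldl is the structural right-fold recurrence
lemma pvPeakB_cons (it : String × String) (rest : List (String × String)) :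
    pvPeakB (it :: rest) =
      max 0 ((if it.1 == "start" then (1 : Int) else if it.1 == "end" then -1 else 0) + pvPeakB rest) := by
  simp [pvPeakB, List.foldl_reverse]

lemma pvPeakB_nonneg (events : List (String × String)) : 0 ≤ pvPeakB events := by
  induction events with
  | nil => simp [pvPeakB]
  | cons it rest ih => rw [pvPeakB_cons]; exact le_max_left _ _

-- A's inner fold from (b, p) with b ≤ p yields peak max p (b + pvPeakB events)
lemma inner_eq (events : List (String × String)) : ∀ (b p : Int), b ≤ p →
    (events.foldl pvStepA (b, p)).2 = max p (b + pvPeakB events) := by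
  induction events with
  | nil =>
    intro b p hbp
    have : pvPeakB [] = 0 := by simp [pvPeakB]
    simp [this, max_eq_left hbp]
  | cons it rest ih =>
    intro b p hbp
    set d : Int := if it.1 == "start" then (1 : Int) else if it.1 == "end" then -1 else 0 with hd
    have hstep : pvStepA (b, p) it = (b + d, max p (b + d)) := by
      simp only [pvStepA, hd]
      split_ifs <;> simp_all <;> omega
    have hP := pvPeakB_nonneg rest
    calc (rest.foldl pvStepA (pvStepA (b, p) it)).2
        = (rest.foldl pvStepA (b + d, max p (b + d))).2 := by rw [hstep]
      _ = max (max p (b + d)) ((b + d) + pvPeakB rest) := ih (b + d) (max p (b + d)) (le_max_right _ _)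
      _ = max p (b + pvPeakB (it :: rest)) := by
            rw [pvPeakB_cons, ← hd]
            rcases le_total (d + pvPeakB rest) 0 with h | h
            · rw [max_eq_left h]; omega
            · rw [max_eq_right h]; omega

lemma peak_eq (events : List (String × String)) :
    (events.foldl pvStepA ((0 : Int), (0 : Int))).2 = pvPeakB events := by
  rw [inner_eq events 0 0 le_rfl]
  simpa using max_eq_right (pvPeakB_nonneg events)

-- A's append-accumulating outer fold is a map
lemma foldl_append_map (l : List (String × List (String × String)))
    (f : String × List (String × String) → String × Int) :
    ∀ (acc : List (String × Int)),
      l.foldl (fun a kv => a ++ [f kv]) acc = acc ++ l.map f := by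
  induction l with
  | nil => simp
  | cons kv rest ih => intro acc; simp [ih]

-- ===== VERDICT =====
theorem find_bookworms_spec : Claim_equal_find_bookworms := by
  intro sp _
  show find_bookworms sp = find_bookworms_alt sp
  unfold find_bookworms find_bookworms_alt
  have := foldl_append_map sp (fun kv => (kv.1, (kv.2.foldl pvStepA (0, 0)).2)) []
  simp only [List.nil_append] at this
  rw [this]
  exact List.map_congr_left (fun kv _ => by rw [peak_eq])
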